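-- pv_equiv track=rewrite | github.com/mohammedh123/adventofcode2022 | day6/main.py | get_idx_of_n_unique_chars
-- ===== SOURCE A (Python) =====
-- from collections import defaultdict
--
-- def get_idx_of_n_unique_chars(n, s):
--     l, r = 0, n - 1
--     num_unique_chars = 0
--     char_count = defaultdict(int)
--
--     for c in s[0:n]:
--         if char_count[c] == 0:
--             num_unique_chars += 1
--         char_count[c] += 1
--
--     while num_unique_chars != n:
--         l_char = s[l]
--         char_count[l_char] -= 1
--         if char_count[l_char] == 0:
--             num_unique_chars -= 1
--
--         l += 1
--         r += 1
--
--         r_char = s[r]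
--         if char_count[r_char] == 0:
--             num_unique_chars += 1
--         char_count[r_char] += 1
--
--     return r + 1
-- ===== SOURCE B (Python) =====
-- def get_idx_of_n_unique_chars(n, s):
--     for i in range(n, len(s) + 1):
--         if len(set(s[i - n:i])) == n:
--             return i
--     raise IndexError("no window of n unique characters")
-- ===== Notes on version B (the rewrite author's own statement) =====
-- stated objective: simpler
-- what changed: Replaces the incremental count-maintained sliding window (defaultdict of counts, unique counter, l/r pointers) by a direct scan that rechecks each window end i via len(set(s[i-n:i])) == n and returns the first hit.
import Mathlib
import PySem

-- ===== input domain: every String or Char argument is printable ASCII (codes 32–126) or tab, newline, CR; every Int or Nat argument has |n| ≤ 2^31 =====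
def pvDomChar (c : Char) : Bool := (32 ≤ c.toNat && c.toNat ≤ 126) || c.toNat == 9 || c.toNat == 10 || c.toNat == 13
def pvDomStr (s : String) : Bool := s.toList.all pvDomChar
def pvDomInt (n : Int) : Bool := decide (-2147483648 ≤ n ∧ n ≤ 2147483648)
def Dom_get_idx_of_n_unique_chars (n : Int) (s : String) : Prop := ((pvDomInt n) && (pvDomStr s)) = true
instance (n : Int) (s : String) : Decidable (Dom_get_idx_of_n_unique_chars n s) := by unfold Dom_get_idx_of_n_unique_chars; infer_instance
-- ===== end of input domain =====

-- B replaces A's incremental count-maintained sliding window by a per-window rescan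
-- (first i with len(set(s[i-n:i])) == n); objective: simpler.

-- ===== PORT A =====
-- the body of A's initial 'for c in s[0:n]' loop
def pvStepA (st : Int × PySem.Dict Char Int) (c : Char) : Int × PySem.Dict Char Int :=
  let numU := if st.2.getD c 0 = 0 then st.1 + 1 else st.1
  (numU, st.2.insert c (st.2.getD c 0 + 1))

-- A's 'while num_unique_chars != n' loop; fuel bounds the iterations (each step r += 1,
-- and Python raises IndexError once r reaches len(s), so len+1 fuel is never exhausted
-- on inputs where A returns); 0 is returned exactly where Python raises IndexError.
def pvLoopA (cs : List Char) (n : Int) : Nat → Int → PySem.Dict Char Int → Int → Int → Int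
  | 0, _, _, _, _ => 0
  | fuel+1, numU, cc, l, r =>
    if numU = n then r + 1
    else
      match PySem.List.pyGet? cs l with
      | none => 0
      | some lc =>
        let cc1 := cc.insert lc (cc.getD lc 0 - 1)
        let numU1 := if cc1.getD lc 0 = 0 then numU - 1 else numU
        match PySem.List.pyGet? cs (r + 1) with
        | none => 0
        | some rc =>
          let numU2 := if cc1.getD rc 0 = 0 then numU1 + 1 else numU1
          pvLoopA cs n fuel numU2 (cc1.insert rc (cc1.getD rc 0 + 1)) (l + 1) (r + 1)

def get_idx_of_n_unique_chars (n : Int) (s : String) : Int :=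
  let cs := s.toList
  let init := (PySem.List.slice cs (some 0) (some n)).foldl pvStepA (0, PySem.Dict.empty)
  pvLoopA cs n (cs.length + 1) init.1 init.2 0 (n - 1)

-- ===== PORT B =====
-- first i in range(n, len(s)+1) with len(set(s[i-n:i])) == n; -1 where Python B raises IndexError
def get_idx_of_n_unique_chars_alt (n : Int) (s : String) : Int :=
  let cs := s.toList
  match (PySem.List.pyRange n ((cs.length : Int) + 1) 1).find?
      (fun i => ((PySem.Set.ofList (PySem.List.slice cs (some (i - n)) (some i))).length : Int) == n) with
  | some i => i
  | none => -1

-- ===== PRECONDITION & SPEC =====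
-- Pre_ excludes exactly the inputs on which A raises IndexError (n < 0, or no length-n
-- all-distinct window exists — in particular n > len(s)); B raises IndexError there too.
def Pre_get_idx_of_n_unique_chars (n : Int) (s : String) : Prop :=
  0 ≤ n ∧ ∃ i ∈ List.range (s.toList.length + 1),
    n.toNat ≤ i ∧ ((s.toList.drop (i - n.toNat)).take n.toNat).toFinset.card = n.toNat
instance (n : Int) (s : String) : Decidable (Pre_get_idx_of_n_unique_chars n s) := by
  unfold Pre_get_idx_of_n_unique_chars; infer_instance

def pvWitness_get_idx_of_n_unique_chars : Int × String := (2, "ab")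

def Spec_get_idx_of_n_unique_chars (n : Int) (s : String) (out : Int) : Prop := out = get_idx_of_n_unique_chars_alt n s
instance (n : Int) (s : String) (out : Int) : Decidable (Spec_get_idx_of_n_unique_chars n s out) := by unfold Spec_get_idx_of_n_unique_chars; infer_instance

-- ===== CLAIM (what is proved, stated in full; the proofs are below) =====
def Claim_equal_get_idx_of_n_unique_chars : Prop := ∀ (n : Int) (s : String), Dom_get_idx_of_n_unique_chars n s → Pre_get_idx_of_n_unique_chars n s → Spec_get_idx_of_n_unique_chars n s (get_idx_of_n_unique_chars n s)

-- ===== LEMMAS AND PROOFS =====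

-- the window of length N ending at position i
def pvWin (cs : List Char) (N i : Nat) : List Char := (cs.drop (i - N)).take N

-- B's per-window test
def pvP (cs : List Char) (N : Nat) : Int → Bool :=
  fun i => ((PySem.Set.ofList (PySem.List.slice cs (some (i - (N : Int))) (some i))).length : Int) == (N : Int)

lemma pvSetLen (l : List Char) : (PySem.Set.ofList l).length = l.toFinset.card := by
  have h1 : (PySem.Set.ofList l).toFinset = l.toFinset := by
    ext x; simp [PySem.Set.mem_ofList]
  rw [← h1, List.toFinset_card_of_nodup (PySem.Set.nodup_ofList l)]

lemma pvP_eq (cs : List Char) (N i : Nat) (h : N ≤ i) :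
    pvP cs N (i : Int) = decide ((pvWin cs N i).toFinset.card = N) := by
  unfold pvP pvWin
  have h1 : (i : Int) - (N : Int) = ((i - N : Nat) : Int) := by omega
  have h2 : i - (i - N) = N := by omega
  rw [h1, PySem.List.slice_natCast, h2, pvSetLen]
  rcases Decidable.em (((cs.drop (i-N)).take N).toFinset.card = N) with hc | hc
  · simp [hc]
  · simp [hc]

lemma pvCardSnoc (w : List Char) (c : Char) :
    (w ++ [c]).toFinset.card = if c ∈ w then w.toFinset.card else w.toFinset.card + 1 := by
  rw [List.toFinset_append]
  simp only [List.toFinset_cons, List.toFinset_nil, insert_empty_eq]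
  rw [Finset.union_comm, ← Finset.insert_eq]
  split_ifs with h
  · exact Finset.card_insert_of_mem (List.mem_toFinset.mpr h)
  · exact Finset.card_insert_of_notMem (fun hm => h (List.mem_toFinset.mp hm))

lemma pvCardCons (m : List Char) (c : Char) :
    (c :: m).toFinset.card = if c ∈ m then m.toFinset.card else m.toFinset.card + 1 := by
  simp only [List.toFinset_cons]
  split_ifs with h
  · exact Finset.card_insert_of_mem (List.mem_toFinset.mpr h)
  · exact Finset.card_insert_of_notMem (fun hm => h (List.mem_toFinset.mp hm))

lemma pvFoldA : ∀ (t w : List Char) (numU : Int) (cc : PySem.Dict Char Int),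
    numU = ((w.toFinset.card : Nat) : Int) →
    (∀ c, cc.getD c 0 = ((w.count c : Nat) : Int)) →
    (t.foldl pvStepA (numU, cc)).1 = (((w ++ t).toFinset.card : Nat) : Int) ∧
      ∀ c, (t.foldl pvStepA (numU, cc)).2.getD c 0 = (((w ++ t).count c : Nat) : Int) := by
  intro t
  induction t with
  | nil => intro w numU cc h1 h2; simpa using ⟨h1, h2⟩
  | cons c t ih =>
    intro w numU cc h1 h2
    have hwc : w ++ c :: t = (w ++ [c]) ++ t := by simp
    rw [hwc, List.foldl_cons]
    have hstep : pvStepA (numU, cc) c =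
        ((if cc.getD c 0 = 0 then numU + 1 else numU), cc.insert c (cc.getD c 0 + 1)) := rfl
    rw [hstep]
    apply ih
    · rw [pvCardSnoc]
      by_cases hm : c ∈ w
      · have : w.count c ≠ 0 := by simp [List.count_eq_zero, hm]
        simp [h2 c, hm, h1, Int.natCast_eq_zero, this]
      · have : w.count c = 0 := by simp [List.count_eq_zero, hm]
        simp [h2 c, hm, h1, this]
    · intro d
      rw [PySem.Dict.getD_insert]
      by_cases hd : d = c
      · subst hd
        simp [h2 d, List.count_append]
      · simp [hd, h2 d, List.count_append, Ne.symm hd]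

lemma pvWinCons (cs : List Char) (N e : Nat) (hN1 : 1 ≤ N) (hNe : N ≤ e) (he : e - N < cs.length) :
    pvWin cs N e = cs[e - N]'he :: (cs.drop (e - N + 1)).take (N - 1) := by
  unfold pvWin
  obtain ⟨M, rfl⟩ : ∃ M, N = M + 1 := ⟨N - 1, by omega⟩
  rw [List.drop_eq_getElem_cons he, List.take_succ_cons]
  simp

lemma pvWinShift (cs : List Char) (N e : Nat) (hN1 : 1 ≤ N) (hNe : N ≤ e) (he : e < cs.length) :
    pvWin cs N (e + 1) = (cs.drop (e - N + 1)).take (N - 1) ++ [cs[e]'he] := by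
  unfold pvWin
  obtain ⟨M, rfl⟩ : ∃ M, N = M + 1 := ⟨N - 1, by omega⟩
  have h1 : e + 1 - (M + 1) = e - (M + 1) + 1 := by omega
  rw [h1, List.take_add_one]
  have hlen : M < (cs.drop (e - (M + 1) + 1)).length := by
    rw [List.length_drop]; omega
  rw [List.getElem?_eq_getElem hlen]
  simp only [List.getElem_drop]
  have h2 : e - (M + 1) + 1 + M = e := by omega
  simp [h2]

lemma pvLoopA_eq (cs : List Char) (N : Nat) :
    ∀ (fuel e : Nat) (numU : Int) (cc : PySem.Dict Char Int),
    N ≤ e → e ≤ cs.length → cs.length - e < fuel →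
    numU = (((pvWin cs N e).toFinset.card : Nat) : Int) →
    (∀ c, cc.getD c 0 = (((pvWin cs N e).count c : Nat) : Int)) →
    (∃ j, j ≤ cs.length ∧ e ≤ j ∧ (pvWin cs N j).toFinset.card = N) →
    pvLoopA cs (N : Int) fuel numU cc ((e : Int) - (N : Int)) ((e : Int) - 1) =
      ((PySem.List.pyRange (e : Int) ((cs.length : Int) + 1) 1).find? (pvP cs N)).getD (-1) := by
  intro fuel
  induction fuel with
  | zero => intro e numU cc _ _ hf; omega
  | succ fuel ih =>
    intro e numU cc hNe helen hf hU hC hex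
    have hrange : PySem.List.pyRange (e : Int) ((cs.length : Int) + 1) 1 =
        (e : Int) :: PySem.List.pyRange ((e : Int) + 1) ((cs.length : Int) + 1) 1 :=
      PySem.List.pyRange_one_cons (by omega)
    by_cases hgood : (pvWin cs N e).toFinset.card = N
    · -- A returns here; B's first window test succeeds
      have hUe : numU = (N : Int) := by rw [hU, hgood]
      rw [hrange]
      simp only [pvLoopA]
      rw [if_pos hUe, List.find?_cons_of_pos (by rw [pvP_eq cs N e hNe]; simp [hgood]),
        Option.getD_some]
      omega
    · -- A slides the window; B's first test fails
      have hne : numU ≠ (N : Int) := by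
        rw [hU]; intro h; apply hgood; exact_mod_cast h
      have hN1 : 1 ≤ N := by
        by_contra h
        have hN0 : N = 0 := by omega
        apply hgood; subst hN0; simp [pvWin]
      obtain ⟨j, hjlen, hej, hjgood⟩ := hex
      have hjne : j ≠ e := fun h => hgood (h ▸ hjgood)
      have helt : e < cs.length := by omega
      have hdlt : e - N < cs.length := by omega
      have hg1 : PySem.List.pyGet? cs ((e : Int) - (N : Int)) = some (cs[e - N]'hdlt) := by
        have h3 : (e : Int) - (N : Int) = ((e - N : Nat) : Int) := by omega
        rw [h3, PySem.List.pyGet?_natCast, List.getElem?_eq_getElem hdlt]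
      have hg2 : PySem.List.pyGet? cs ((e : Int) - 1 + 1) = some (cs[e]'helt) := by
        have h3 : (e : Int) - 1 + 1 = ((e : Nat) : Int) := by omega
        rw [h3, PySem.List.pyGet?_natCast, List.getElem?_eq_getElem helt]
      set lc := cs[e - N]'hdlt with hlc
      set rc := cs[e]'helt with hrc
      set m := (cs.drop (e - N + 1)).take (N - 1) with hm
      have hw : pvWin cs N e = lc :: m := pvWinCons cs N e hN1 hNe hdlt
      have hw' : pvWin cs N (e + 1) = m ++ [rc] := pvWinShift cs N e hN1 hNe helt
      have hC1 : ∀ c, (cc.insert lc (cc.getD lc 0 - 1)).getD c 0 = ((m.count c : Nat) : Int) := by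
        intro c
        rw [PySem.Dict.getD_insert]
        split_ifs with hcl
        · rw [hcl, hC lc, hw, List.count_cons_self]; push_cast; ring
        · rw [hC c, hw]; simp only [List.count_cons]
          have : ¬(lc = c) := fun h => hcl h.symm
          simp [this]
      have hU1 : (if (cc.insert lc (cc.getD lc 0 - 1)).getD lc 0 = 0 then numU - 1 else numU)
          = ((m.toFinset.card : Nat) : Int) := by
        rw [hC1 lc, hU, hw, pvCardCons]
        by_cases hmem : lc ∈ m
        · have hcnt : ((m.count lc : Nat) : Int) ≠ 0 := by simp [List.count_eq_zero, hmem]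
          rw [if_neg hcnt, if_pos hmem]
        · have hcnt : ((m.count lc : Nat) : Int) = 0 := by simp [List.count_eq_zero, hmem]
          rw [if_pos hcnt, if_neg hmem]; push_cast; ring
      have hC2 : ∀ c, ((cc.insert lc (cc.getD lc 0 - 1)).insert rc
            ((cc.insert lc (cc.getD lc 0 - 1)).getD rc 0 + 1)).getD c 0
          = (((m ++ [rc]).count c : Nat) : Int) := by
        intro c
        rw [PySem.Dict.getD_insert]
        split_ifs with hcr
        · rw [hcr, hC1 rc]; simp [List.count_append]
        · rw [hC1 c]; simp only [List.count_append]
          have : c ∉ [rc] := by simp [hcr]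
          rw [List.count_eq_zero.mpr this, Nat.add_zero]
      have hU2 : (if (cc.insert lc (cc.getD lc 0 - 1)).getD rc 0 = 0
            then (if (cc.insert lc (cc.getD lc 0 - 1)).getD lc 0 = 0 then numU - 1 else numU) + 1
            else (if (cc.insert lc (cc.getD lc 0 - 1)).getD lc 0 = 0 then numU - 1 else numU))
          = (((m ++ [rc]).toFinset.card : Nat) : Int) := by
        rw [hU1, hC1 rc, pvCardSnoc]
        by_cases hmem : rc ∈ m
        · have hcnt : ((m.count rc : Nat) : Int) ≠ 0 := by simp [List.count_eq_zero, hmem]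
          rw [if_neg hcnt, if_pos hmem]
        · have hcnt : ((m.count rc : Nat) : Int) = 0 := by simp [List.count_eq_zero, hmem]
          rw [if_pos hcnt, if_neg hmem]; push_cast; ring
      have ha1 : (e : Int) - (N : Int) + 1 = (((e + 1 : Nat)) : Int) - (N : Int) := by push_cast; ring
      have ha2 : (e : Int) - 1 + 1 = (((e + 1 : Nat)) : Int) - 1 := by push_cast; ring
      have hb1 : (e : Int) + 1 = (((e + 1 : Nat)) : Int) := by push_cast; ring
      rw [hrange, List.find?_cons_of_neg (by rw [pvP_eq cs N e hNe]; simp [hgood]), hb1]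
      simp only [pvLoopA]
      rw [if_neg hne, hg1, hg2]
      simp only []
      rw [hU2, ha1, ha2]
      exact ih (e + 1) _ _ (by omega) (by omega) (by omega)
        (by rw [hw']) (by intro c; rw [hw']; exact hC2 c)
        ⟨j, hjlen, by omega, hjgood⟩

lemma pvAltEq (n : Int) (s : String) :
    get_idx_of_n_unique_chars_alt n s =
      ((PySem.List.pyRange n ((s.toList.length : Int) + 1) 1).find?
        (fun i => ((PySem.Set.ofList (PySem.List.slice s.toList (some (i - n)) (some i))).length : Int) == n)).getD (-1) := by
  simp only [get_idx_of_n_unique_chars_alt]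
  cases hfind : (PySem.List.pyRange n ((s.toList.length : Int) + 1) 1).find?
      (fun i => ((PySem.Set.ofList (PySem.List.slice s.toList (some (i - n)) (some i))).length : Int) == n) <;> rfl

-- ===== VERDICT (by name: the statement is the Claim_ definition above) =====
theorem get_idx_of_n_unique_chars_spec : Claim_equal_get_idx_of_n_unique_chars := by
  intro n s _hdom hpre
  unfold Spec_get_idx_of_n_unique_chars
  obtain ⟨hn, hex⟩ := hpre
  obtain ⟨N, rfl⟩ : ∃ N : Nat, n = (N : Int) := ⟨n.toNat, by omega⟩
  have hexN : ∃ j, j ≤ s.toList.length ∧ N ≤ j ∧ (pvWin s.toList N j).toFinset.card = N := by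
    obtain ⟨i, hi, hNi, hcard⟩ := hex
    exact ⟨i, by simpa using List.mem_range.mp hi, by simpa using hNi, by simpa [pvWin] using hcard⟩
  obtain ⟨j, hjlen, hNj, -⟩ := id hexN
  have hNlen : N ≤ s.toList.length := le_trans hNj hjlen
  -- the initial for-loop over s[0:n]
  have hslice : PySem.List.slice s.toList (some 0) (some (N : Int)) = s.toList.take N := by
    rw [PySem.List.slice_zero_start, PySem.List.slice_to_natCast]
  have hfold := pvFoldA (s.toList.take N) [] 0 PySem.Dict.empty (by simp)
    (by intro c; simp [PySem.Dict.getD_empty])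
  have hwinN : pvWin s.toList N N = s.toList.take N := by simp [pvWin]
  -- the while loop
  have hloop := pvLoopA_eq s.toList N (s.toList.length + 1) N
    ((s.toList.take N).foldl pvStepA (0, PySem.Dict.empty)).1
    ((s.toList.take N).foldl pvStepA (0, PySem.Dict.empty)).2
    le_rfl hNlen (by omega)
    (by rw [hwinN]; simpa using hfold.1)
    (by intro c; rw [hwinN]; simpa using hfold.2 c)
    hexN
  rw [pvAltEq]
  simp only [get_idx_of_n_unique_chars]
  rw [hslice]
  have hz : (N : Int) - (N : Int) = 0 := by ring
  rw [hz] at hloop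
  exact hloop
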